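-- pv_equiv track=rewrite | github.com/PalmBeachPost/APdates | Python/apDate.py | ap_string
-- ===== SOURCE A (Python) =====
-- def ap_string(text):
--     replacementpairs = [
--         ("January 0", "Jan. "), ("February 0", "Feb. "), ("August 0", "Aug. "), ("September 0", "Sept. "), ("October 0", "Oct. "), ("November 0", "Nov. "), ("December 0", "Dec. "),
--         ("March 0", "March "), ("April 0", "April "), ("May 0", "May "), ("June 0", "June "), ("July 0", "July "),
--         ("January ", "Jan. "), ("February ", "Feb. "), ("August ", "Aug. "), ("September ", "Sept. "), ("October ", "Oct. "), ("November ", "Nov. "), ("December ", "Dec. ")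
--     ]
--     for pair in replacementpairs:
--         source, destination = pair
--         text = text.replace(source, destination)
--     return(text)
-- ===== SOURCE B (Python) =====
-- # One left-to-right pass over the text with a priority table (each "Month 0"
-- # entry before its "Month " entry), instead of 19 sequential whole-string
-- # str.replace passes.
-- _AP_TABLE = [
--     ("January 0", "Jan. "), ("February 0", "Feb. "), ("August 0", "Aug. "),
--     ("September 0", "Sept. "), ("October 0", "Oct. "), ("November 0", "Nov. "),
--     ("December 0", "Dec. "),
--     ("March 0", "March "), ("April 0", "April "), ("May 0", "May "),
--     ("June 0", "June "), ("July 0", "July "),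
--     ("January ", "Jan. "), ("February ", "Feb. "), ("August ", "Aug. "),
--     ("September ", "Sept. "), ("October ", "Oct. "), ("November ", "Nov. "),
--     ("December ", "Dec. "),
-- ]
--
-- def ap_string(text):
--     out = []
--     i = 0
--     n = len(text)
--     while i < n:
--         for src, dst in _AP_TABLE:
--             if text.startswith(src, i):
--                 out.append(dst)
--                 i += len(src)
--                 break
--         else:
--             out.append(text[i])
--             i += 1
--     return "".join(out)
-- ===== Notes on version B (the rewrite author's own statement) =====
-- stated objective: alternative
-- what changed: Replaced 19 sequential whole-string str.replace passes by a single left-to-right scan that, at each position, consults a priority table (every 'Month 0' entry before its 'Month ' entry) and emits either the AP replacement or the current character.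
import Mathlib
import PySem

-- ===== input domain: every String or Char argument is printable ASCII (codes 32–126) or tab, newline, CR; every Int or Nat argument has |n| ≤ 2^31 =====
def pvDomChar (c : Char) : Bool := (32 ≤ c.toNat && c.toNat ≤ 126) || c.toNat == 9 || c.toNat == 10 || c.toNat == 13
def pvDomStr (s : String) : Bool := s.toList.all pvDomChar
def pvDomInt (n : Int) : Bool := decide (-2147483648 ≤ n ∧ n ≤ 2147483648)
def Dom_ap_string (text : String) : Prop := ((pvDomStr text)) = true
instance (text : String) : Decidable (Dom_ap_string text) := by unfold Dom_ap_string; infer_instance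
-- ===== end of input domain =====

-- B replaces A's 19 sequential whole-string str.replace passes by a single
-- left-to-right scan with a priority table (alternative decomposition, same result).

-- ===== PORT A =====
def apPairs : List (String × String) :=
  [("January 0", "Jan. "), ("February 0", "Feb. "), ("August 0", "Aug. "),
   ("September 0", "Sept. "), ("October 0", "Oct. "), ("November 0", "Nov. "),
   ("December 0", "Dec. "),
   ("March 0", "March "), ("April 0", "April "), ("May 0", "May "),
   ("June 0", "June "), ("July 0", "July "),
   ("January ", "Jan. "), ("February ", "Feb. "), ("August ", "Aug. "),
   ("September ", "Sept. "), ("October ", "Oct. "), ("November ", "Nov. "),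
   ("December ", "Dec. ")]

def ap_string (text : String) : String :=
  apPairs.foldl (fun t p => PySem.Str.replace t p.1 p.2) text

-- ===== PORT B =====
-- the same table Source B carries, in the same priority order, as char lists
def apTable : List (List Char × List Char) :=
  [("January 0".toList, "Jan. ".toList), ("February 0".toList, "Feb. ".toList), ("August 0".toList, "Aug. ".toList),
   ("September 0".toList, "Sept. ".toList), ("October 0".toList, "Oct. ".toList), ("November 0".toList, "Nov. ".toList),
   ("December 0".toList, "Dec. ".toList),
   ("March 0".toList, "March ".toList), ("April 0".toList, "April ".toList), ("May 0".toList, "May ".toList),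
   ("June 0".toList, "June ".toList), ("July 0".toList, "July ".toList),
   ("January ".toList, "Jan. ".toList), ("February ".toList, "Feb. ".toList), ("August ".toList, "Aug. ".toList),
   ("September ".toList, "Sept. ".toList), ("October ".toList, "Oct. ".toList), ("November ".toList, "Nov. ".toList),
   ("December ".toList, "Dec. ".toList)]

-- Source B's while-loop: at each position, the first table entry that matches is
-- emitted and skipped, otherwise the character is copied; fuel = remaining length
def scanGo (ps : List (List Char × List Char)) : Nat → List Char → List Char
  | _, [] => []
  | 0, s => s
  | fuel + 1, c :: cs =>
    match ps.find? (fun q => q.1.isPrefixOf (c :: cs)) with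
    | some q => q.2 ++ scanGo ps fuel (cs.drop (q.1.length - 1))
    | none => c :: scanGo ps fuel cs

def ap_string_alt (text : String) : String :=
  String.ofList (scanGo apTable text.toList.length text.toList)

-- ===== PRECONDITION & SPEC =====
def Spec_ap_string (text : String) (out : String) : Prop := out = ap_string_alt text
instance (text : String) (out : String) : Decidable (Spec_ap_string text out) := by unfold Spec_ap_string; infer_instance

-- ===== CLAIM (what is proved, stated in full; the proofs are below) =====
def Claim_equal_ap_string : Prop := ∀ (text : String), Dom_ap_string text → Spec_ap_string text (ap_string text)

-- ===== LEMMAS AND PROOFS =====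

-- proof-side model of Python's str.replace (non-overlapping, left to right)
def repl (old new : List Char) : List Char → List Char
  | [] => []
  | c :: cs =>
    if old.isPrefixOf (c :: cs) then new ++ repl old new (cs.drop (old.length - 1))
    else c :: repl old new cs
termination_by s => s.length
decreasing_by all_goals simp only [List.length_drop, List.length_cons]; omega

-- proof-side model of Source B's scan, without fuel
def scanT (ps : List (List Char × List Char)) : List Char → List Char
  | [] => []
  | c :: cs =>
    match ps.find? (fun q => q.1.isPrefixOf (c :: cs)) with
    | some q => q.2 ++ scanT ps (cs.drop (q.1.length - 1))
    | none => c :: scanT ps cs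
termination_by s => s.length
decreasing_by all_goals simp only [List.length_drop, List.length_cons]; omega

def apHeads : List Char := ['J', 'F', 'A', 'S', 'O', 'N', 'D', 'M']

def okSide (l : List Char) : Bool :=
  match l with
  | [] => false
  | h :: t => h ∈ apHeads && t.all (fun c => !(c ∈ apHeads))

def incompatB (a b : List Char × List Char) : Bool :=
  !(b.1.isPrefixOf a.2) && !(a.2.isPrefixOf b.1)

def pairwiseB : List (List Char × List Char) → Bool
  | [] => true
  | a :: l => l.all (incompatB a) && pairwiseB l

def GoodL (ps : List (List Char × List Char)) : Bool :=
  ps.all (fun p => okSide p.1 && okSide p.2) && pairwiseB ps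

set_option maxRecDepth 20000 in
theorem good_apTable : GoodL apTable = true := by decide

theorem okSide_spec {l : List Char} (h : okSide l = true) :
    ∃ hd tl, l = hd :: tl ∧ hd ∈ apHeads ∧ ∀ c ∈ tl, c ∉ apHeads := by
  match l with
  | [] => simp [okSide] at h
  | hd :: tl =>
    simp only [okSide, Bool.and_eq_true, List.all_eq_true] at h
    exact ⟨hd, tl, rfl, by simpa using h.1, fun c hc => by simpa using h.2 c hc⟩

-- repl equations
theorem repl_nil (old new : List Char) : repl old new [] = [] := by rw [repl]

theorem repl_cons_pos {old : List Char} (new : List Char) {c : Char} {cs : List Char}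
    (h : old <+: c :: cs) :
    repl old new (c :: cs) = new ++ repl old new (cs.drop (old.length - 1)) := by
  rw [repl, if_pos (List.isPrefixOf_iff_prefix.mpr h)]

theorem repl_cons_neg {old : List Char} (new : List Char) {c : Char} {cs : List Char}
    (h : ¬ old <+: c :: cs) :
    repl old new (c :: cs) = c :: repl old new cs := by
  rw [repl, if_neg (by simpa [List.isPrefixOf_iff_prefix] using h)]

-- bridge: PySem's fuelled replace loop computes repl
theorem go_eq (old new : List Char) (hold : old ≠ []) :
    ∀ (fuel : Nat) (l acc : List Char), l.length ≤ fuel →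
      PySem.Chars.replace.go old new fuel l acc = acc.reverse ++ repl old new l := by
  intro fuel
  induction fuel with
  | zero =>
    intro l acc hl
    have : l = [] := List.length_eq_zero_iff.mp (Nat.le_zero.mp hl)
    subst this
    simp [PySem.Chars.replace.go, repl_nil]
  | succ f ih =>
    intro l acc hl
    match l with
    | [] => simp [PySem.Chars.replace.go, repl_nil]
    | c :: cs =>
      rw [PySem.Chars.replace.go]
      by_cases h : old <+: c :: cs
      · rw [if_pos (List.isPrefixOf_iff_prefix.mpr h)]
        have hlen : 1 ≤ old.length := by
          cases old with
          | nil => exact absurd rfl hold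
          | cons a t => simp
        have hdrop : ((c :: cs).drop old.length).length ≤ f := by
          simp only [List.length_drop, List.length_cons] at *
          omega
        rw [ih _ _ hdrop, repl_cons_pos _ h]
        have : (c :: cs).drop old.length = cs.drop (old.length - 1) := by
          cases old with
          | nil => exact absurd rfl hold
          | cons a t => simp
        rw [this]
        simp
      · rw [if_neg (by simpa [List.isPrefixOf_iff_prefix] using h)]
        have : cs.length ≤ f := by simpa using hl
        rw [ih _ _ this, repl_cons_neg _ h]
        simp

theorem replace_eq_repl (old new s : List Char) (hold : old ≠ []) :
    PySem.Chars.replace s old new = repl old new s := by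
  rw [PySem.Chars.replace, if_neg (by simpa [List.isEmpty_iff] using hold)]
  simpa using go_eq old new hold s.length s [] le_rfl

-- if no occurrence of old starts before k, replace leaves the first k chars alone
theorem repl_take_drop (old new : List Char) :
    ∀ (k : Nat) (s : List Char), k ≤ s.length →
      (∀ p < k, ¬ old <+: s.drop p) →
      repl old new s = s.take k ++ repl old new (s.drop k) := by
  intro k
  induction k with
  | zero => intro s _ _; simp
  | succ n ih =>
    intro s hk hocc
    match s with
    | [] => simp at hk
    | c :: cs =>
      have h0 : ¬ old <+: c :: cs := by simpa using hocc 0 (Nat.succ_pos n)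
      rw [repl_cons_neg _ h0,
        ih cs (by simpa using hk) (fun p hp => by simpa using hocc (p + 1) (by omega))]
      simp

-- a pattern whose chars avoid the head letters is a prefix of repl's output iff of its input
theorem repl_prefix_iff {old new : List Char}
    (hold : ∃ hd tl, old = hd :: tl ∧ hd ∈ apHeads)
    (hnew : ∃ hd tl, new = hd :: tl ∧ hd ∈ apHeads) :
    ∀ (s t : List Char), (∀ c ∈ t, c ∉ apHeads) →
      (t <+: repl old new s ↔ t <+: s) := by
  obtain ⟨oh, otl, hoe, hoh⟩ := hold
  obtain ⟨nh, ntl, hne, hnh⟩ := hnew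
  intro s
  induction s with
  | nil => intro t ht; rw [repl_nil]
  | cons c cs ih =>
    intro t ht
    by_cases h : old <+: c :: cs
    · rw [repl_cons_pos _ h]
      match t with
      | [] => simp
      | c0 :: t' =>
        have hc0 : c0 ∉ apHeads := ht c0 (by simp)
        constructor
        · intro hp
          exfalso
          rw [hne] at hp
          exact hc0 ((List.cons_prefix_cons.mp (by simpa using hp)).1 ▸ hnh)
        · intro hp
          exfalso
          rw [hoe] at h
          have h1 := (List.cons_prefix_cons.mp h).1
          have h2 := (List.cons_prefix_cons.mp hp).1
          exact hc0 ((h2.trans h1.symm) ▸ hoh)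
    · rw [repl_cons_neg _ h]
      match t with
      | [] => simp
      | c0 :: t' =>
        simp only [List.cons_prefix_cons]
        exact and_congr_right fun _ => ih t' (fun c hc => ht c (by simp [hc]))

theorem scan_empty_pairs : ∀ s : List Char, scanT [] s = s
  | [] => by rw [scanT]
  | c :: cs => by rw [scanT]; simp [scan_empty_pairs cs]

theorem not_prefix_append {α : Type} {a b w : List α} (h1 : ¬ a <+: b) (h2 : ¬ b <+: a) :
    ¬ a <+: b ++ w := by
  intro h
  rcases Nat.le_total a.length b.length with hle | hle
  · exact h1 (List.prefix_of_prefix_length_le h (List.prefix_append b w) hle)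
  · exact h2 (List.prefix_of_prefix_length_le (List.prefix_append b w) h hle)

-- the scanner copies a block verbatim when no pattern can match inside it
theorem scan_append (ps : List (List Char × List Char))
    (hps : ∀ r ∈ ps, ∃ hd tl, r.1 = hd :: tl ∧ hd ∈ apHeads) :
    ∀ (d w : List Char), (∀ r ∈ ps, ¬ r.1 <+: d ++ w) → (∀ c ∈ d.tail, c ∉ apHeads) →
      scanT ps (d ++ w) = d ++ scanT ps w := by
  intro d w
  induction d with
  | nil => intro _ _; simp
  | cons c d' ih =>
    intro hnp htl
    have hnone : List.find? (fun q => q.1.isPrefixOf (c :: (d' ++ w))) ps = none := by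
      rw [List.find?_eq_none]
      intro r hr
      simpa [List.isPrefixOf_iff_prefix] using hnp r hr
    simp only [List.cons_append]
    rw [scanT]
    simp only [hnone]
    cases d' with
    | nil => simp
    | cons c1 d'' =>
      have hc1 : c1 ∉ apHeads := htl c1 (by simp)
      have hp1 : ∀ r ∈ ps, ¬ r.1 <+: c1 :: d'' ++ w := by
        intro r hr
        obtain ⟨hd, tl, hre, hh⟩ := hps r hr
        rw [hre]
        simp only [List.cons_append, List.cons_prefix_cons]
        rintro ⟨rfl, -⟩
        exact hc1 hh
      have hp2 : ∀ ch ∈ (c1 :: d'').tail, ch ∉ apHeads := by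
        intro ch hc
        simp only [List.tail_cons] at hc ⊢
        exact htl ch (List.mem_cons_of_mem _ hc)
      rw [ih hp1 hp2]

theorem find?_congr {α : Type} (p1 p2 : α → Bool) : ∀ l : List α,
    (∀ a ∈ l, p1 a = p2 a) → l.find? p1 = l.find? p2 := by
  intro l
  induction l with
  | nil => intro _; rfl
  | cons a l ih =>
    intro h
    simp only [List.find?_cons]
    rw [h a (by simp), ih (fun b hb => h b (by simp [hb]))]

-- one replace pass absorbed into the scanner
theorem main_step (q : List Char × List Char) (ps' : List (List Char × List Char))
    (hq1 : okSide q.1 = true) (hq2 : okSide q.2 = true)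
    (hps' : ∀ r ∈ ps', okSide r.1 = true)
    (hinc : ∀ r ∈ ps', incompatB q r = true) :
    ∀ s : List Char, scanT ps' (repl q.1 q.2 s) = scanT (q :: ps') s := by
  obtain ⟨qh, qtl, hq1e, hq1h, hq1t⟩ := okSide_spec hq1
  obtain ⟨nh, ntl, hq2e, hq2h, hq2t⟩ := okSide_spec hq2
  have hik : ∀ r ∈ ps', ¬ r.1 <+: q.2 ∧ ¬ q.2 <+: r.1 := by
    intro r hr
    have hthis := hinc r hr
    constructor
    · intro hp
      simp [incompatB, List.isPrefixOf_iff_prefix.mpr hp] at hthis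
    · intro hp
      simp [incompatB, List.isPrefixOf_iff_prefix.mpr hp] at hthis
  suffices H : ∀ n, ∀ s : List Char, s.length ≤ n →
      scanT ps' (repl q.1 q.2 s) = scanT (q :: ps') s by
    intro s; exact H s.length s le_rfl
  intro n
  induction n with
  | zero =>
    intro s hs
    have : s = [] := List.length_eq_zero_iff.mp (Nat.le_zero.mp hs)
    subst this
    rw [repl_nil, scanT, scanT]
  | succ n ih =>
    intro s hs
    match s with
    | [] => rw [repl_nil, scanT, scanT]
    | c :: cs =>
      by_cases hA : q.1 <+: c :: cs
      · obtain ⟨u, hu⟩ := id hA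
        have hq1c : qh = c ∧ qtl ++ u = cs := by
          rw [hq1e] at hu
          simpa using hu
        have hdrop : cs.drop (q.1.length - 1) = u := by
          rw [hq1e]
          simp only [List.length_cons, Nat.add_sub_cancel]
          rw [← hq1c.2]
          exact List.drop_left
        rw [repl_cons_pos _ hA]
        have happ : scanT ps' (q.2 ++ repl q.1 q.2 (cs.drop (q.1.length - 1))) =
            q.2 ++ scanT ps' (repl q.1 q.2 (cs.drop (q.1.length - 1))) := by
          apply scan_append ps'
          · intro r hr
            obtain ⟨rh, rtl, hre, hrh, -⟩ := okSide_spec (hps' r hr)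
            exact ⟨rh, rtl, hre, hrh⟩
          · intro r hr
            exact not_prefix_append (hik r hr).1 (hik r hr).2
          · rw [hq2e]
            intro ch hc
            exact hq2t ch (by simpa using hc)
        rw [happ, hdrop]
        have hu' : u.length ≤ n := by
          have hlen := congrArg List.length hu
          simp only [List.length_append, List.length_cons, hq1e] at hlen
          simp only [List.length_cons] at hs
          omega
        rw [ih u hu']
        have hfq : List.find? (fun r => r.1.isPrefixOf (c :: cs)) (q :: ps') = some q :=
          List.find?_cons_of_pos (by simpa [List.isPrefixOf_iff_prefix] using hA)
        conv_rhs => rw [scanT]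
        simp only [hfq, hdrop]
      · rw [repl_cons_neg _ hA]
        have hiff : ∀ r ∈ ps',
            (r.1.isPrefixOf (c :: repl q.1 q.2 cs)) = (r.1.isPrefixOf (c :: cs)) := by
          intro r hr
          obtain ⟨rh, rtl, hre, hrh, hrt⟩ := okSide_spec (hps' r hr)
          have hpi := repl_prefix_iff ⟨qh, qtl, hq1e, hq1h⟩ ⟨nh, ntl, hq2e, hq2h⟩ cs rtl hrt
          rw [hre, Bool.eq_iff_iff]
          simp only [List.isPrefixOf_iff_prefix, List.cons_prefix_cons]
          exact and_congr_right fun _ => hpi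
        have hfcongr : List.find? (fun r => r.1.isPrefixOf (c :: repl q.1 q.2 cs)) ps' =
            List.find? (fun r => r.1.isPrefixOf (c :: cs)) ps' :=
          find?_congr _ _ ps' hiff
        rcases hf : List.find? (fun r => r.1.isPrefixOf (c :: cs)) ps' with _ | r
        · conv_lhs => rw [scanT]
          simp only [hfcongr, hf]
          rw [ih cs (by simpa using hs)]
          have hfq : List.find? (fun r => r.1.isPrefixOf (c :: cs)) (q :: ps') = none := by
            rw [List.find?_cons_of_neg (by simpa [List.isPrefixOf_iff_prefix] using hA), hf]
          conv_rhs => rw [scanT]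
          simp only [hfq]
        · have hrmem := List.mem_of_find?_eq_some hf
          have hrpre : r.1 <+: c :: cs := by
            have := List.find?_some hf
            simpa [List.isPrefixOf_iff_prefix] using this
          obtain ⟨rh, rtl, hre, hrh, hrt⟩ := okSide_spec (hps' r hrmem)
          have hklen : r.1.length = rtl.length + 1 := by rw [hre]; simp
          have hkle : rtl.length + 1 ≤ cs.length + 1 := by
            have := hrpre.length_le
            simp only [List.length_cons] at this
            omega
          have hocc : ∀ p < rtl.length + 1, ¬ q.1 <+: (c :: cs).drop p := by
            intro p hp
            match p with
            | 0 => simpa using hA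
            | p + 1 =>
              intro hpre
              have hplen : p + 1 < (c :: cs).length := by
                have := hrpre.length_le
                simp only [List.length_cons] at this ⊢
                omega
              have hidx : p + 1 < r.1.length := by omega
              have hch : (c :: cs)[p + 1]'hplen = qh := by
                rw [hq1e] at hpre
                have h0 : ((c :: cs).drop (p + 1)).length > 0 := by
                  simp only [List.length_drop]
                  simp only [List.length_cons] at hplen ⊢
                  omega
                have := (List.IsPrefix.getElem hpre (i := 0) (by simp)).symm
                rw [List.getElem_drop] at this
                simpa using this
              have hrch : r.1[p + 1]'hidx = (c :: cs)[p + 1]'hplen :=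
                List.IsPrefix.getElem hrpre hidx
              have hmem : r.1[p + 1]'hidx ∈ rtl := by
                have : r.1[p + 1]'hidx = rtl[p]'(by omega) := by
                  have hgx : r.1[p + 1]'hidx = (rh :: rtl)[p + 1]'(by rw [← hre]; exact hidx) := by
                    congr 1
                  rw [hgx, List.getElem_cons_succ]
                rw [this]
                exact List.getElem_mem _
              exact hrt _ hmem (by rw [hrch, hch]; exact hq1h)
          have htd := repl_take_drop q.1 q.2 (rtl.length + 1) (c :: cs)
            (by simpa using hkle) hocc
          rw [repl_cons_neg _ hA] at htd
          simp only [List.take_succ_cons, List.drop_succ_cons, List.cons_append,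
            List.cons.injEq, true_and] at htd
          have hdropr : (repl q.1 q.2 cs).drop rtl.length = repl q.1 q.2 (cs.drop rtl.length) := by
            rw [htd]
            exact List.drop_left' (List.length_take_of_le (by omega))
          conv_lhs => rw [scanT]
          simp only [hfcongr, hf]
          rw [show r.1.length - 1 = rtl.length from by omega, hdropr]
          rw [ih (cs.drop rtl.length) (by
            simp only [List.length_drop]
            simp only [List.length_cons] at hs
            omega)]
          have hfq : List.find? (fun r => r.1.isPrefixOf (c :: cs)) (q :: ps') = some r := by
            rw [List.find?_cons_of_neg (by simpa [List.isPrefixOf_iff_prefix] using hA), hf]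
          conv_rhs => rw [scanT]
          simp only [hfq]
          rw [show r.1.length - 1 = rtl.length from by omega]

theorem chain : ∀ ps : List (List Char × List Char), GoodL ps = true →
    ∀ s : List Char, ps.foldl (fun t q => repl q.1 q.2 t) s = scanT ps s := by
  intro ps
  induction ps with
  | nil => intro _ s; simp [scan_empty_pairs]
  | cons q ps' ih =>
    intro hg s
    simp only [GoodL, pairwiseB, List.all_cons, Bool.and_eq_true, List.all_eq_true] at hg
    have hg' : GoodL ps' = true := by
      simp only [GoodL, Bool.and_eq_true, List.all_eq_true]
      exact ⟨hg.1.2, hg.2.2⟩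
    simp only [List.foldl_cons]
    rw [ih hg' (repl q.1 q.2 s),
      main_step q ps' hg.1.1.1 hg.1.1.2 (fun r hr => ((hg.1.2 r hr).1))
        (fun r hr => hg.2.1 r hr) s]

theorem scanGo_eq_scanT (ps : List (List Char × List Char)) :
    ∀ (fuel : Nat) (s : List Char), s.length ≤ fuel → scanGo ps fuel s = scanT ps s := by
  intro fuel
  induction fuel with
  | zero =>
    intro s hs
    have : s = [] := List.length_eq_zero_iff.mp (Nat.le_zero.mp hs)
    subst this
    rw [scanGo, scanT]
  | succ f ih =>
    intro s hs
    match s with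
    | [] => rw [scanGo, scanT]
    | c :: cs =>
      rw [scanGo, scanT]
      rcases hf : List.find? (fun q => q.1.isPrefixOf (c :: cs)) ps with _ | q
      · simp only [hf]
        rw [ih cs (by simpa using hs)]
      · simp only [hf]
        rw [ih _ (by simp only [List.length_drop]; simp at hs; omega)]

theorem strfold : ∀ (ps : List (String × String)) (t : String),
    (ps.foldl (fun t p => PySem.Str.replace t p.1 p.2) t).toList =
      (ps.map (fun p => (p.1.toList, p.2.toList))).foldl
        (fun l q => PySem.Chars.replace l q.1 q.2) t.toList := by
  intro ps
  induction ps with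
  | nil => intro t; rfl
  | cons p ps ih =>
    intro t
    simp only [List.foldl_cons, List.map_cons]
    rw [ih, PySem.Str.toList_replace]

theorem foldl_replace_eq_repl : ∀ (qs : List (List Char × List Char)),
    (∀ q ∈ qs, q.1 ≠ []) → ∀ l : List Char,
      qs.foldl (fun l q => PySem.Chars.replace l q.1 q.2) l =
        qs.foldl (fun l q => repl q.1 q.2 l) l := by
  intro qs
  induction qs with
  | nil => intro _ l; rfl
  | cons q qs ih =>
    intro h l
    simp only [List.foldl_cons]
    rw [replace_eq_repl _ _ _ (h q (by simp)), ih (fun r hr => h r (by simp [hr]))]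

set_option maxRecDepth 20000 in
theorem map_apPairs : apPairs.map (fun p => (p.1.toList, p.2.toList)) = apTable := by decide

-- ===== VERDICT (by name: the statement is the Claim_ definition above) =====
set_option maxRecDepth 20000 in
theorem apTable_srcs_ne_nil : ∀ q ∈ apTable, q.1 ≠ [] := by decide

theorem ap_string_spec : Claim_equal_ap_string := by
  intro text _
  unfold Spec_ap_string ap_string ap_string_alt
  have h1 := strfold apPairs text
  rw [map_apPairs, foldl_replace_eq_repl apTable apTable_srcs_ne_nil,
    chain apTable good_apTable] at h1
  rw [scanGo_eq_scanT apTable text.toList.length text.toList le_rfl, ← h1,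
    String.ofList_toList]
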